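-- pv_equiv track=rewrite | github.com/Asyamdaff/HckRnk-Solutions | UnexpectedDemand.py | filledOrders
-- ===== SOURCE A (Python) =====
-- def filledOrders(order, k):
--     # Write your code here
--
--     cnt = 0
--     order = sorted(order)
--
--     while len(order) > 0 and k >= order[0]:
--         cnt += 1
--         k -= order[0]
--         order = order[1:]
--
--     return cnt
-- ===== SOURCE B (Python) =====
-- def filledOrders(order, k):
--     # Build the table of running prefix sums of the sorted orders once,
--     # then return the index of the first prefix sum exceeding the budget.
--     prefix = []
--     s = 0
--     for x in sorted(order):
--         s += x
--         prefix.append(s)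
--     for i, p in enumerate(prefix):
--         if p > k:
--             return i
--     return len(prefix)
-- ===== Notes on version B (the rewrite author's own statement) =====
-- stated objective: faster
-- what changed: Replaces A's subtract-from-budget loop that re-slices the list each iteration (order = order[1:]) with a single prefix-sum table built over the sorted list followed by a scan for the first prefix sum exceeding k.
import Mathlib
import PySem

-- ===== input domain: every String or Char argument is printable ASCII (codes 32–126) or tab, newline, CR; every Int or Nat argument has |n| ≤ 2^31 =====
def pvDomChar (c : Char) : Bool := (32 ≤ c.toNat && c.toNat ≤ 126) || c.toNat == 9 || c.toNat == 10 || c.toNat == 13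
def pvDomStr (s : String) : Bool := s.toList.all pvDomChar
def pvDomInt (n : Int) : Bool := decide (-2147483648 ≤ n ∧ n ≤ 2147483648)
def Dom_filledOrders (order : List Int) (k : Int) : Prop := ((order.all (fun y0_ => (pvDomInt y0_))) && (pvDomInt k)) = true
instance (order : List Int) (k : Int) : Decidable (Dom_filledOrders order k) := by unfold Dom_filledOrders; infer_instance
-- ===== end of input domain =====

-- B replaces A's subtract-and-reslice loop with a prefix-sum table over the sorted
-- list plus a scan for the first entry exceeding k (faster: avoids per-step slicing).


-- ===== PORT A =====
-- while len(order) > 0 and k >= order[0]: cnt += 1; k -= order[0]; order = order[1:]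
def filledOrdersLoopA : List Int → Int → Int → Int
  | [], _, cnt => cnt
  | x :: xs, k, cnt => if k ≥ x then filledOrdersLoopA xs (k - x) (cnt + 1) else cnt

def filledOrders (order : List Int) (k : Int) : Int :=
  filledOrdersLoopA (PySem.List.sorted order (fun x => x) false) k 0

-- ===== PORT B =====
-- first pass: prefix sums of the sorted list, accumulated left to right
def prefixSumsB : List Int → Int → List Int
  | [], _ => []
  | x :: xs, s => (s + x) :: prefixSumsB xs (s + x)

-- second pass: index of the first prefix sum exceeding k (length if none)
def findExceedB : List Int → Int → Int → Int
  | [], _, i => i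
  | p :: ps, k, i => if p > k then i else findExceedB ps k (i + 1)

def filledOrders_alt (order : List Int) (k : Int) : Int :=
  findExceedB (prefixSumsB (PySem.List.sorted order (fun x => x) false) 0) k 0

-- ===== PRECONDITION & SPEC =====
def Spec_filledOrders (order : List Int) (k : Int) (out : Int) : Prop := out = filledOrders_alt order k
instance (order : List Int) (k : Int) (out : Int) : Decidable (Spec_filledOrders order k out) := by unfold Spec_filledOrders; infer_instance

-- ===== CLAIM (what is proved, stated in full; the proofs are below) =====
def Claim_equal_filledOrders : Prop := ∀ (order : List Int) (k : Int), Dom_filledOrders order k → Spec_filledOrders order k (filledOrders order k)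

-- ===== LEMMAS AND PROOFS =====
theorem loopA_eq_findExceed (xs : List Int) :
    ∀ (k s cnt : Int), filledOrdersLoopA xs k cnt = findExceedB (prefixSumsB xs s) (s + k) cnt := by
  induction xs with
  | nil => intro k s cnt; simp [filledOrdersLoopA, prefixSumsB, findExceedB]
  | cons x xs ih =>
    intro k s cnt
    simp only [filledOrdersLoopA, prefixSumsB, findExceedB]
    have hcond : (s + x > s + k) = ¬ (k ≥ x) := by
      by_cases h : k ≥ x <;> simp [h] <;> omega
    by_cases h : k ≥ x
    · have : ¬ (s + x > s + k) := by omega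
      simp [h, this]
      have := ih (k - x) (s + x) (cnt + 1)
      rwa [show s + x + (k - x) = s + k by ring] at this
    · have : s + x > s + k := by omega
      simp [h, this]

-- ===== VERDICT (by name: the statement is the Claim_ definition above) =====
theorem filledOrders_spec : Claim_equal_filledOrders := by
  intro order k _
  unfold Spec_filledOrders filledOrders filledOrders_alt
  have := loopA_eq_findExceed (PySem.List.sorted order (fun x => x) false) k 0 0
  rwa [show (0 : Int) + k = k by ring] at this
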